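-- pv_equiv track=rewrite | github.com/jordenrsantos-sys/MTG-Deck | api/engine/layers/redundancy_index_v1.py | _clean_sorted_unique_strings
-- ===== SOURCE A (Python) =====
-- from typing import Any, Dict, List
--
-- def _nonempty_str(value: Any) -> str | None:
--     if isinstance(value, str):
--         token = value.strip()
--         if token != "":
--             return token
--     return None
--
-- def _clean_sorted_unique_strings(values: Any) -> List[str]:
--     if not isinstance(values, list):
--         return []
--
--     cleaned = {
--         token
--         for token in (_nonempty_str(value) for value in values)
--         if token is not None
--     }
--     return sorted(cleaned)
-- ===== SOURCE B (Python) =====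
-- def _clean_sorted_unique_strings(values):
--     if not isinstance(values, list):
--         return []
--     cleaned = []
--     for value in values:
--         if isinstance(value, str):
--             token = value.strip()
--             if token != "":
--                 cleaned.append(token)
--     cleaned.sort()
--     result = []
--     for token in cleaned:
--         if not result or token != result[-1]:
--             result.append(token)
--     return result
-- ===== Notes on version B (the rewrite author's own statement) =====
-- stated objective: alternative
-- what changed: Replaces the hash-set comprehension with a plain cleaned list that is sorted and then deduplicated in one pass by comparing each token with the last kept element; no set is ever built.
import Mathlib
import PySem

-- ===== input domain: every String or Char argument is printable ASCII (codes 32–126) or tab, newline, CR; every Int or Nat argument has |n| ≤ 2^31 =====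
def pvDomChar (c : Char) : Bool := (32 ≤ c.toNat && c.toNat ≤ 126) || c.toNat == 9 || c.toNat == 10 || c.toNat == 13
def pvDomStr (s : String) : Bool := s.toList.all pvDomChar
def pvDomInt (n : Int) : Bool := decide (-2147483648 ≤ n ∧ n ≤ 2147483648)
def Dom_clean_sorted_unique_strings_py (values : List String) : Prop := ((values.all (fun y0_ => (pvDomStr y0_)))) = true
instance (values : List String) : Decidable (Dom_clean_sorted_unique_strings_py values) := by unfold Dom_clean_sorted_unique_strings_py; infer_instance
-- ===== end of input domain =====

-- B builds a plain cleaned list, sorts it, and removes duplicates in one pass by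
-- comparing each token with the last kept element — no set is ever built (alternative decomposition, same cost).

-- ===== PORT A =====
-- _nonempty_str: strip; return the token if nonempty, else None (isinstance(value, str) is always true here)
def nonempty_str_py (value : String) : Option String :=
  let token := PySem.Str.strip value
  if token ≠ "" then some token else none

def clean_sorted_unique_strings_py (values : List String) : List String :=
  -- 'not isinstance(values, list)' is always false under the type convention
  let cleaned : PySem.Set String := PySem.Set.ofList (values.filterMap nonempty_str_py)
  PySem.List.sorted cleaned (fun x => x) false

-- ===== PORT B =====
def clean_sorted_unique_strings_py_alt (values : List String) : List String :=
  let cleaned := values.foldl (fun acc value =>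
      let token := PySem.Str.strip value
      if token ≠ "" then acc ++ [token] else acc) []
  let sortedc := PySem.List.sorted cleaned (fun x => x) false
  -- 'if not result or token != result[-1]: result.append(token)'
  sortedc.foldl (fun result token =>
      if result.getLast? ≠ some token then result ++ [token] else result) []

-- ===== PRECONDITION & SPEC =====
def Spec_clean_sorted_unique_strings_py (values : List String) (out : List String) : Prop := out = clean_sorted_unique_strings_py_alt values
instance (values : List String) (out : List String) : Decidable (Spec_clean_sorted_unique_strings_py values out) := by unfold Spec_clean_sorted_unique_strings_py; infer_instance

-- ===== CLAIM (what is proved, stated in full; the proofs are below) =====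
def Claim_equal_clean_sorted_unique_strings_py : Prop := ∀ (values : List String), Dom_clean_sorted_unique_strings_py values → Spec_clean_sorted_unique_strings_py values (clean_sorted_unique_strings_py values)

-- ===== LEMMAS AND PROOFS =====

-- B's inner dedup loop, written recursively for reasoning: ddAux prev l drops tokens equal to prev
def ddAux (prev : String) : List String → List String
  | [] => []
  | t :: l => if t = prev then ddAux prev l else t :: ddAux t l

-- the foldl dedup with a nonempty accumulator unfolds to ddAux of the last element
lemma foldl_dedup_eq_ddAux (l : List String) : ∀ (acc : List String) (p : String),
    acc.getLast? = some p →
    l.foldl (fun result token => if result.getLast? ≠ some token then result ++ [token] else result) acc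
      = acc ++ ddAux p l := by
  induction l with
  | nil => intro acc p _; simp [ddAux]
  | cons t l ih =>
    intro acc p hp
    by_cases ht : t = p
    · subst ht
      simp only [List.foldl_cons, hp, ddAux]
      simpa [hp] using ih acc t hp
    · have hne : acc.getLast? ≠ some t := by rw [hp]; simpa using fun h => ht h.symm
      simp only [List.foldl_cons, if_pos hne, ddAux, if_neg ht]
      have := ih (acc ++ [t]) t (by simp)
      simpa using this

-- ddAux on a (≤)-chained list with prev a lower bound: strictly increasing, bounded below, same members except prev
lemma ddAux_spec (l : List String) : ∀ (p : String),
    l.Pairwise (· ≤ ·) → (∀ x ∈ l, p ≤ x) →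
    (ddAux p l).Pairwise (· < ·) ∧ (∀ x ∈ ddAux p l, p < x) ∧
      (∀ x, x ∈ ddAux p l ↔ x ∈ l ∧ x ≠ p) := by
  induction l with
  | nil => intro p _ _; simp [ddAux]
  | cons t l ih =>
    intro p hpair hlb
    have hpt : p ≤ t := hlb t (by simp)
    have htl : ∀ x ∈ l, t ≤ x := by
      intro x hx; exact (List.pairwise_cons.mp hpair).1 x hx
    have hpairl : l.Pairwise (· ≤ ·) := (List.pairwise_cons.mp hpair).2
    by_cases ht : t = p
    · subst ht
      have := ih t hpairl htl
      have hdd : ddAux t (t :: l) = ddAux t l := by simp [ddAux]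
      rw [hdd]
      refine ⟨this.1, this.2.1, ?_⟩
      intro x
      rw [this.2.2 x]
      constructor
      · rintro ⟨hx, hne⟩; exact ⟨by simp [hx], hne⟩
      · rintro ⟨hx, hne⟩
        rcases List.mem_cons.mp hx with h | h
        · exact absurd h hne
        · exact ⟨h, hne⟩
    · have hptlt : p < t := lt_of_le_of_ne hpt (fun h => ht h.symm)
      have := ih t hpairl htl
      simp only [ddAux, if_neg ht]
      refine ⟨?_, ?_, ?_⟩
      · exact List.pairwise_cons.mpr ⟨fun x hx => (this.2.2 x).mp hx |>.elim (fun hxl hne => lt_of_le_of_ne (htl x hxl) (fun h => hne h.symm)) , this.1⟩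
      · intro x hx
        rcases List.mem_cons.mp hx with h | h
        · subst h; exact hptlt
        · exact lt_trans hptlt (this.2.1 x h)
      · intro x
        constructor
        · intro hx
          rcases List.mem_cons.mp hx with h | h
          · subst h; exact ⟨by simp, ne_of_gt hptlt⟩
          · obtain ⟨hxl, hxt⟩ := (this.2.2 x).mp h
            exact ⟨by simp [hxl], ne_of_gt (lt_of_lt_of_le hptlt (htl x hxl))⟩
        · rintro ⟨hx, hne⟩
          rcases List.mem_cons.mp hx with h | h
          · subst h; simp
          · by_cases hxt : x = t
            · subst hxt; simp
            · exact List.mem_cons_of_mem _ ((this.2.2 x).mpr ⟨h, hxt⟩)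

-- B's dedup pass on any (≤)-chained list: strictly increasing result with the same members
lemma dedup_spec (s : List String) (hs : s.Pairwise (· ≤ ·)) :
    (s.foldl (fun result token => if result.getLast? ≠ some token then result ++ [token] else result) []).Pairwise (· < ·) ∧
      (∀ x, x ∈ s.foldl (fun result token => if result.getLast? ≠ some token then result ++ [token] else result) [] ↔ x ∈ s) := by
  cases s with
  | nil => simp
  | cons t l =>
    have htl : ∀ x ∈ l, t ≤ x := fun x hx => (List.pairwise_cons.mp hs).1 x hx
    have hpairl : l.Pairwise (· ≤ ·) := (List.pairwise_cons.mp hs).2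
    have hrw : (t :: l).foldl (fun result token => if result.getLast? ≠ some token then result ++ [token] else result) []
        = t :: ddAux t l := by
      simp only [List.foldl_cons]
      have h0 : ([] : List String).getLast? ≠ some t := by simp
      rw [if_pos h0]
      simpa using foldl_dedup_eq_ddAux l [t] t (by simp)
    obtain ⟨h1, h2, h3⟩ := ddAux_spec l t hpairl htl
    rw [hrw]
    refine ⟨List.pairwise_cons.mpr ⟨h2, h1⟩, ?_⟩
    intro x
    constructor
    · intro hx
      rcases List.mem_cons.mp hx with h | h
      · simp [h]
      · exact List.mem_cons_of_mem _ ((h3 x).mp h).1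
    · intro hx
      rcases List.mem_cons.mp hx with h | h
      · simp [h]
      · by_cases hxt : x = t
        · simp [hxt]
        · exact List.mem_cons_of_mem _ ((h3 x).mpr ⟨h, hxt⟩)

-- the two cleaning loops build the same list of tokens
lemma cleaned_eq_aux (values : List String) : ∀ (acc : List String),
    values.foldl (fun acc value =>
      let token := PySem.Str.strip value
      if token ≠ "" then acc ++ [token] else acc) acc
      = acc ++ values.filterMap nonempty_str_py := by
  induction values with
  | nil => intro acc; simp
  | cons v l ih =>
    intro acc
    simp only [List.foldl_cons, List.filterMap_cons, nonempty_str_py]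
    by_cases h : PySem.Str.strip v ≠ ""
    · simp only [if_pos h, ih]
      have h1 : nonempty_str_py v = some (PySem.Str.strip v) := by simp [nonempty_str_py, h]
      simp only [nonempty_str_py] at h1 ⊢
      simp
    · simp only [if_neg h, ih]
      simp only [ne_eq, not_not] at h
      simp [nonempty_str_py]

-- ===== VERDICT (by name: the statement is the Claim_ definition above) =====
theorem clean_sorted_unique_strings_py_spec : Claim_equal_clean_sorted_unique_strings_py := by
  intro values _
  unfold Spec_clean_sorted_unique_strings_py clean_sorted_unique_strings_py clean_sorted_unique_strings_py_alt
  rw [cleaned_eq_aux values []]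
  simp only [List.nil_append]
  set c := values.filterMap nonempty_str_py with hc
  set s := PySem.List.sorted c (fun x => x) false with hs
  have hpair : s.Pairwise (· ≤ ·) := by
    simpa using PySem.List.sorted_pairwise c (fun x => x)
  obtain ⟨h1, h2⟩ := dedup_spec s hpair
  set ys := s.foldl (fun result token => if result.getLast? ≠ some token then result ++ [token] else result) [] with hys
  have hnodup_ys : ys.Nodup := h1.imp (fun h => ne_of_lt h)
  have hperm : ys.Perm (PySem.Set.ofList c) := by
    rw [List.perm_ext_iff_of_nodup hnodup_ys (PySem.Set.nodup_ofList c)]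
    intro x
    rw [h2 x, PySem.Set.mem_ofList, hs, PySem.List.mem_sorted]
  have := PySem.List.sorted_eq_of_perm_of_pairwise_lt (xs := PySem.Set.ofList c)
    (key := fun x => x) (ys := ys) hperm (by simpa using h1)
  simpa using this
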